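-- pv_equiv track=rewrite | github.com/EarthSub/Python-Fundamentals-Tasks | Exercise Text Processing/exercise_1_extract_person_information.py | name_searcher
-- ===== SOURCE A (Python) =====
-- def name_searcher(some_string):
--     the_name = ""
--     spliter = some_string.split("@")
--     searcher = spliter[1]
--     for letter in searcher:
--         if letter.isalpha():
--             the_name += letter
--         else:
--             return the_name
-- ===== SOURCE B (Python) =====
-- def name_searcher(some_string):
--     spliter = some_string.split("@")
--     searcher = spliter[1]
--     idx = next((i for i, c in enumerate(searcher) if not c.isalpha()), None)
--     return searcher[:idx] if idx is not None else None
-- ===== Notes on version B (the rewrite author's own statement) =====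
-- stated objective: simpler
-- what changed: Replaces the character-accumulating loop with early return by a boundary search (index of first non-alphabetic character) followed by a slice, preserving the implicit None when no boundary exists.
import Mathlib
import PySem

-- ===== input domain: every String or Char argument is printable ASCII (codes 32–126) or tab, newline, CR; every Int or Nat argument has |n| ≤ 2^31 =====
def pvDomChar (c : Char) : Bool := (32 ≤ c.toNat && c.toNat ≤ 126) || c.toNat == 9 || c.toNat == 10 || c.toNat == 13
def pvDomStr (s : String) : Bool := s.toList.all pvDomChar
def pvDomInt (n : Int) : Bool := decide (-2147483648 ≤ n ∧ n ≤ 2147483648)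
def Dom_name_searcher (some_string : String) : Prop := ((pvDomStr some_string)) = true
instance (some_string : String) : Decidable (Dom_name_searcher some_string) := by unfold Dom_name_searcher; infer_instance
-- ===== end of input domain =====

-- B replaces A's accumulating loop by a first-non-alphabetic boundary search followed by a slice (simpler decomposition).

-- ===== PORT A =====
-- the for-loop of A: acc is `the_name`; falls off the loop → Python's implicit None
def nsLoopA (acc : List Char) : List Char → Option String
  | [] => none
  | c :: rest =>
    if PySem.Chars.isalpha c then nsLoopA (acc ++ [c]) rest
    else some (String.ofList acc)

def name_searcher (some_string : String) : Option String :=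
  match PySem.List.pyGet? (PySem.Chars.splitOn some_string.toList ['@']) 1 with
  | none => none   -- IndexError in Python; excluded by Pre_
  | some searcher => nsLoopA [] searcher

-- ===== PORT B =====
def name_searcher_alt (some_string : String) : Option String :=
  match PySem.List.pyGet? (PySem.Chars.splitOn some_string.toList ['@']) 1 with
  | none => none   -- IndexError in Python; excluded by Pre_
  | some searcher =>
    match searcher.findIdx? (fun c => !PySem.Chars.isalpha c) with
    | some i => some (String.ofList (searcher.take i))   -- searcher[:idx]
    | none => none

-- ===== PRECONDITION & SPEC =====
-- Pre_ admits exactly the inputs where the separator occurs; otherwise A's spliter[1] raises IndexError.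
def Pre_name_searcher (some_string : String) : Prop := '@' ∈ some_string.toList
instance (some_string : String) : Decidable (Pre_name_searcher some_string) := by unfold Pre_name_searcher; infer_instance
def pvWitness_name_searcher : String := "a@bc1"

def Spec_name_searcher (some_string : String) (out : Option String) : Prop := out = name_searcher_alt some_string
instance (some_string : String) (out : Option String) : Decidable (Spec_name_searcher some_string out) := by unfold Spec_name_searcher; infer_instance

-- ===== CLAIM (what is proved, stated in full; the proofs are below) =====
def Claim_equal_name_searcher : Prop := ∀ (some_string : String), Dom_name_searcher some_string → Pre_name_searcher some_string → Spec_name_searcher some_string (name_searcher some_string)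

-- ===== LEMMAS AND PROOFS =====
lemma nsLoopA_findIdx (cs acc : List Char) :
    nsLoopA acc cs = match cs.findIdx? (fun c => !PySem.Chars.isalpha c) with
      | some i => some (String.ofList (acc ++ cs.take i))
      | none => none := by
  induction cs generalizing acc with
  | nil => simp [nsLoopA]
  | cons c rest ih =>
    by_cases h : PySem.Chars.isalpha c = true
    · rw [List.findIdx?_cons]
      simp only [h, Bool.not_true, nsLoopA, ih]
      
      cases hf : rest.findIdx? (fun c => !PySem.Chars.isalpha c) <;>
        simp [List.append_assoc]
    · rw [List.findIdx?_cons]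
      simp [nsLoopA, h]

-- ===== VERDICT (by name: the statement is the Claim_ definition above) =====
theorem name_searcher_spec : Claim_equal_name_searcher := by
  intro s _ _
  unfold Spec_name_searcher name_searcher name_searcher_alt
  cases PySem.List.pyGet? (PySem.Chars.splitOn s.toList ['@']) 1 with
  | none => rfl
  | some searcher =>
    simp only []
    rw [nsLoopA_findIdx]
    cases searcher.findIdx? (fun c => !PySem.Chars.isalpha c) <;> simp
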